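-- pv_equiv track=rewrite | github.com/milenamilosa/python | leuven_lists1/lab6_start.py | count_x_y
-- ===== SOURCE A (Python) =====
-- def count_x_y(count_string):
--
--     count = 0
--     for i in range (0, len(count_string)-2):
--         n = i+2
--         if count_string[i] == "x" and count_string[n] == "y":
--             count += 1
--         if count_string[i] == "y" and count_string[n] == "x":
--             count +=1
--
--     return count
-- ===== SOURCE B (Python) =====
-- def count_x_y(count_string):
--     # Indices i and i+2 share parity, so each gap-2 pair of the original
--     # string is an adjacent pair inside the even-index or odd-index slice.
--     total = 0
--     for seg in (count_string[0::2], count_string[1::2]):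
--         for a, b in zip(seg, seg[1:]):
--             if (a == "x" and b == "y") or (a == "y" and b == "x"):
--                 total += 1
--     return total
-- ===== Notes on version B (the rewrite author's own statement) =====
-- stated objective: faster
-- what changed: B replaces A's per-index loop over range(len-2) comparing s[i] with s[i+2] by splitting the string into its even-index and odd-index slices and counting adjacent pattern pairs within each slice (gap-2 positions share parity), replacing per-character indexing with C-level slicing and zip.
import Mathlib
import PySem

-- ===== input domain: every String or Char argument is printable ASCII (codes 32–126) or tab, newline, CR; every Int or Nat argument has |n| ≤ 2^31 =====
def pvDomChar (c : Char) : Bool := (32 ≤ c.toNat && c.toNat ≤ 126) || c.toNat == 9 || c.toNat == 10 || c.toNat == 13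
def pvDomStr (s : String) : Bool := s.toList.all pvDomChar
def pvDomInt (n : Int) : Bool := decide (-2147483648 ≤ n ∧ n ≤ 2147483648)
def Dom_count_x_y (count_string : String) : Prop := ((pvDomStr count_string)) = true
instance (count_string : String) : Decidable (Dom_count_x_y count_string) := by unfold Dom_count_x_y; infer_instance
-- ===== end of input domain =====

-- B counts each gap-2 'x?y'/'y?x' pair as an adjacent pair inside the even-index and odd-index
-- slices instead of indexing the original string; same O(n) cost, a different decomposition.

-- ===== PORT A =====
-- literal port: i runs over range(0, len-2); s[i] is Str.pyGet? (always in range here)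
def count_x_y (count_string : String) : Int :=
  (PySem.List.pyRange 0 (PySem.Str.len count_string - 2) 1).foldl
    (fun count i =>
      let n := i + 2
      let count :=
        if PySem.Str.pyGet? count_string i == some 'x' && PySem.Str.pyGet? count_string n == some 'y'
        then count + 1 else count
      if PySem.Str.pyGet? count_string i == some 'y' && PySem.Str.pyGet? count_string n == some 'x'
      then count + 1 else count)
    0

-- ===== PORT B =====
-- inner loop of Source B: for a, b in zip(seg, seg[1:]): …
def pvSegCount (seg : String) (total : Int) : Int :=
  (seg.toList.zip (PySem.Str.slice seg (some 1) none).toList).foldl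
    (fun tot p => if (p.1 == 'x' && p.2 == 'y') || (p.1 == 'y' && p.2 == 'x') then tot + 1 else tot)
    total

-- s[0::2] / s[1::2]; step 2 ≠ 0 so Str.slice? is always `some` and `.getD ""` is exact
def count_x_y_alt (count_string : String) : Int :=
  [(PySem.Str.slice? count_string (some 0) none 2).getD "",
   (PySem.Str.slice? count_string (some 1) none 2).getD ""].foldl
    (fun total seg => pvSegCount seg total) 0

-- ===== PRECONDITION & SPEC =====
def Spec_count_x_y (count_string : String) (out : Int) : Prop := out = count_x_y_alt count_string
instance (count_string : String) (out : Int) : Decidable (Spec_count_x_y count_string out) := by unfold Spec_count_x_y; infer_instance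

-- ===== CLAIM (what is proved, stated in full; the proofs are below) =====
def Claim_equal_count_x_y : Prop := ∀ (count_string : String), Dom_count_x_y count_string → Spec_count_x_y count_string (count_x_y count_string)

-- ===== LEMMAS AND PROOFS =====

-- even-index elements of a list (s[0::2]); s[1::2] is pvEvens l.tail
def pvEvens : List Char → List Char
  | [] => []
  | [a] => [a]
  | a :: _ :: t => a :: pvEvens t

-- the indicator A adds at one position (on the Option values A's indexing produces)
def pvIndO (x y : Option Char) : Int :=
  (if x == some 'x' && y == some 'y' then 1 else 0) +
  (if x == some 'y' && y == some 'x' then 1 else 0)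

-- common spec: the gap-2 count, by structural recursion
def pvH : List Char → Int
  | a :: b :: c :: t => pvIndO (some a) (some c) + pvH (b :: c :: t)
  | _ => 0

-- B's adjacent-pair count of one slice
def pvAdj (cs : List Char) : Int :=
  ((cs.zip cs.tail).countP (fun p => (p.1 == 'x' && p.2 == 'y') || (p.1 == 'y' && p.2 == 'x')) : Int)

theorem pvEvens_cons (c : Char) (t : List Char) : pvEvens (c :: t) = c :: pvEvens t.tail := by
  cases t <;> rfl

theorem pvFilterMap_even (l : List Char) :
    (List.range ((l.length + 1) / 2)).filterMap (fun k => l[2 * k]?) = pvEvens l := by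
  induction l using pvEvens.induct with
  | case1 => rfl
  | case2 a => simp [List.range_succ, pvEvens]
  | case3 a b t ih =>
    have hlen : ((a :: b :: t).length + 1) / 2 = (t.length + 1) / 2 + 1 := by
      simp [List.length_cons]; omega
    rw [hlen, List.range_succ_eq_map, List.filterMap_cons, List.filterMap_map]
    simp only [Nat.mul_zero, List.getElem?_cons_zero]
    show a :: _ = a :: pvEvens t
    congr 1

theorem pvSlice_even (l : List Char) :
    PySem.List.slice? l (some 0) none 2 = some (pvEvens l) := by
  rw [← pvFilterMap_even]
  simp only [PySem.List.slice?, PySem.List.sliceIndices]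
  norm_num
  have hc : (if 0 < l.length then (((l.length : Int) + 2 - 1) / 2).toNat else 0)
      = (l.length + 1) / 2 := by split_ifs with h <;> omega
  rw [hc]
  apply List.filterMap_congr; intro k _
  congr 1

theorem pvSlice_odd (l : List Char) :
    PySem.List.slice? l (some 1) none 2 = some (pvEvens l.tail) := by
  cases l with
  | nil => decide
  | cons c t =>
    rw [show (c :: t).tail = t from rfl, ← pvFilterMap_even]
    simp only [PySem.List.slice?, PySem.List.sliceIndices]
    norm_num
    have hc : (if 0 < t.length then (((t.length : Int) + 2 - 1) / 2).toNat else 0)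
        = (t.length + 1) / 2 := by split_ifs with h <;> omega
    rw [hc]
    apply List.filterMap_congr; intro k _
    show (c :: t)[(1 + 2 * (k : Int)).toNat]? = t[2 * k]?
    have h1 : (1 + 2 * (k : Int)).toNat = 2 * k + 1 := by omega
    rw [h1, List.getElem?_cons_succ]

def pvIndB (a c : Char) : Int :=
  if (a == 'x' && c == 'y') || (a == 'y' && c == 'x') then 1 else 0

theorem pvIndB_eq (a c : Char) : pvIndB a c = pvIndO (some a) (some c) := by
  unfold pvIndB pvIndO
  by_cases h1 : a = 'x' <;> by_cases h2 : c = 'y' <;> by_cases h3 : a = 'y' <;>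
    by_cases h4 : c = 'x' <;> simp_all

theorem pvSegCount_eq (seg : String) (total : Int) :
    pvSegCount seg total = total + pvAdj seg.toList := by
  unfold pvSegCount pvAdj
  rw [PySem.Str.toList_slice]
  simp only [PySem.Chars.slice_eq_listSlice, PySem.List.slice_from_one]
  rw [PySem.List.foldl_if_add_one]

theorem pvAdj_cons2 (x y : Char) (r : List Char) :
    pvAdj (x :: y :: r) = pvIndB x y + pvAdj (y :: r) := by
  unfold pvAdj pvIndB
  simp only [List.tail_cons, List.zip_cons_cons, List.countP_cons]
  split_ifs <;> push_cast <;> ring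

theorem pvB_main (l : List Char) :
    pvAdj (pvEvens l) + pvAdj (pvEvens l.tail) = pvH l := by
  induction l using pvH.induct with
  | case1 a b c t ih =>
    have e1 : pvEvens (a :: b :: c :: t) = a :: pvEvens (c :: t) := rfl
    have e2 : pvEvens (c :: t) = c :: pvEvens t.tail := pvEvens_cons c t
    have e3 : (a :: b :: c :: t).tail = b :: c :: t := rfl
    have e4 : (b :: c :: t).tail = c :: t := rfl
    rw [e1, e3, e2, pvAdj_cons2, pvIndB_eq]
    rw [e4, e2] at ih
    unfold pvH
    omega
  | case2 l h =>
    rcases l with _ | ⟨a, _ | ⟨b, _ | ⟨c, t⟩⟩⟩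
    · simp [pvAdj, pvEvens, pvH]
    · simp [pvAdj, pvEvens, pvH]
    · simp [pvAdj, pvEvens, pvH]
    · exact absurd rfl (h a b c t)

theorem pvA_sum (l : List Char) :
    ((List.range (l.length - 2)).map (fun k => pvIndO l[k]? l[k + 2]?)).sum = pvH l := by
  induction l using pvH.induct with
  | case1 a b c t ih =>
    have hlen : (a :: b :: c :: t).length - 2 = ((b :: c :: t).length - 2) + 1 := by
      simp [List.length_cons]
    rw [hlen, List.range_succ_eq_map, List.map_cons, List.map_map, List.sum_cons]
    have hshift : ((List.range ((b :: c :: t).length - 2)).map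
          ((fun k => pvIndO (a :: b :: c :: t)[k]? (a :: b :: c :: t)[k + 2]?) ∘ Nat.succ)).sum
        = ((List.range ((b :: c :: t).length - 2)).map
          (fun k => pvIndO (b :: c :: t)[k]? (b :: c :: t)[k + 2]?)).sum := by
      congr 1
    rw [hshift, ih]
    rfl
  | case2 l h =>
    rcases l with _ | ⟨a, _ | ⟨b, _ | ⟨c, t⟩⟩⟩
    · rfl
    · rfl
    · rfl
    · exact absurd rfl (h a b c t)

theorem count_x_y_eq (s : String) : count_x_y s = pvH s.toList := by
  unfold count_x_y
  rw [PySem.Str.len_eq, PySem.List.pyRange_one, List.foldl_map]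
  rw [PySem.List.foldl_congr_mem _ _
      (fun (acc : Int) (k : Nat) => acc + pvIndO s.toList[k]? s.toList[k + 2]?) 0 ?_]
  · rw [PySem.List.foldl_add, zero_add]
    have hn : (((s.toList.length : Int)) - 2 - 0).toNat = s.toList.length - 2 := by omega
    rw [hn, pvA_sum]
  · intro acc k _
    have h1 : (0 : Int) + (k : Int) = ((k : Nat) : Int) := by omega
    have h2 : (k : Int) + 2 = (((k + 2 : Nat)) : Int) := by push_cast; ring
    simp only [h1, h2, PySem.Str.pyGet?_natCast]
    unfold pvIndO
    split_ifs <;> ring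

theorem count_x_y_alt_eq (s : String) :
    count_x_y_alt s = pvAdj (pvEvens s.toList) + pvAdj (pvEvens s.toList.tail) := by
  unfold count_x_y_alt
  have h0 : (PySem.Str.slice? s (some 0) none 2).getD "" = String.ofList (pvEvens s.toList) := by
    unfold PySem.Str.slice?
    rw [PySem.Chars.slice?_eq_listSlice?, pvSlice_even]
    rfl
  have h1 : (PySem.Str.slice? s (some 1) none 2).getD "" = String.ofList (pvEvens s.toList.tail) := by
    unfold PySem.Str.slice?
    rw [PySem.Chars.slice?_eq_listSlice?, pvSlice_odd]
    rfl
  simp only [List.foldl_cons, List.foldl_nil, h0, h1]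
  rw [pvSegCount_eq, pvSegCount_eq]
  simp

-- ===== VERDICT (by name: the statement is the Claim_ definition above) =====
theorem count_x_y_spec : Claim_equal_count_x_y := by
  intro s _
  unfold Spec_count_x_y
  rw [count_x_y_eq, count_x_y_alt_eq, pvB_main]
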